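-- pv_equiv track=rewrite | github.com/errbufferoverfl/warring-mill | 04-passport-processing.py | standardised
-- ===== SOURCE A (Python) =====
-- def standardised(lines: list) -> list[list[str]]:
--     standardised_puzzle = list()
--     batch = list()
--
--     for line in lines:
--         if line != '':
--             batch.append(line)
--         else:
--             standardised_batch = ' '.join(batch).split(' ')
--             standardised_puzzle.append(standardised_batch)
--             batch = list()
--
--     return standardised_puzzle
-- ===== SOURCE B (Python) =====
-- def standardised(lines: list) -> list[list[str]]:
--     out = []
--     while '' in lines:
--         i = lines.index('')
--         out.append(' '.join(lines[:i]).split(' '))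
--         lines = lines[i + 1:]
--     return out
-- ===== Notes on version B (the rewrite author's own statement) =====
-- stated objective: alternative
-- what changed: Replaces A's single accumulate-and-flush pass with repeated search-and-cut: find the first blank line, join/split the prefix as one batch, and continue on the remainder, so no running batch accumulator is kept.
import Mathlib
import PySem

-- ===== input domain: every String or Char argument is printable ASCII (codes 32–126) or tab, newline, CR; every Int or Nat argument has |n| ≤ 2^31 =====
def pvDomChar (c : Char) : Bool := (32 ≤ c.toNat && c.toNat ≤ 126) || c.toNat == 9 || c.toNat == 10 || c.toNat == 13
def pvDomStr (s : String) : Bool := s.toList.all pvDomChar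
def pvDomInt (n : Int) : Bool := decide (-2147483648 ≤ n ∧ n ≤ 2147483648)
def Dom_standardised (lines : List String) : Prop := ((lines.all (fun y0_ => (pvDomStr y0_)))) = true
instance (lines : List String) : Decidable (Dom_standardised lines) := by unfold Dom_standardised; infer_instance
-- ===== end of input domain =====

-- B replaces A's accumulate-and-flush pass by repeated search-and-cut at the first blank line (alternative decomposition, same cost).

-- ===== PORT A =====
-- one step of A's for-loop; state = (standardised_puzzle, batch)
def pvStepA (st : List (List String) × List String) (line : String) :
    List (List String) × List String :=
  if line ≠ "" then (st.1, st.2 ++ [line])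
  else (st.1 ++ [((PySem.Str.split? (PySem.Str.join " " st.2) " ").getD [])], [])

def standardised (lines : List String) : List (List String) :=
  (lines.foldl pvStepA ([], [])).1

-- ===== PORT B =====
-- Source B's while-loop: find the first '' (list.index), flush lines[:i], continue on lines[i+1:]
def pvAltGo (lines : List String) (out : List (List String)) : List (List String) :=
  match h : PySem.List.index? lines "" with
  | none => out
  | some i =>
      pvAltGo (lines.drop (i + 1))
        (out ++ [((PySem.Str.split? (PySem.Str.join " " (lines.take i)) " ").getD [])])
termination_by lines.length
decreasing_by
  have := PySem.List.getElem_of_index?_eq_some h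
  obtain ⟨hk, -, -⟩ := this
  simp [List.length_drop]; omega

def standardised_alt (lines : List String) : List (List String) :=
  pvAltGo lines []

-- ===== PRECONDITION & SPEC =====
def Spec_standardised (lines : List String) (out : List (List String)) : Prop := out = standardised_alt lines
instance (lines : List String) (out : List (List String)) : Decidable (Spec_standardised lines out) := by unfold Spec_standardised; infer_instance

-- ===== CLAIM (what is proved, stated in full; the proofs are below) =====
def Claim_equal_standardised : Prop := ∀ (lines : List String), Dom_standardised lines → Spec_standardised lines (standardised lines)

-- ===== LEMMAS AND PROOFS =====

-- folding A's step over a blank-free block just appends it to the batch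
theorem pvFoldA_no_blank (ls : List String) (p : List (List String)) (b : List String)
    (h : "" ∉ ls) : ls.foldl pvStepA (p, b) = (p, b ++ ls) := by
  induction ls generalizing b with
  | nil => simp
  | cons x xs ih =>
      have hx : x ≠ "" := by rintro rfl; exact h (List.mem_cons_self ..)
      have hxs : "" ∉ xs := fun hm => h (List.mem_cons_of_mem _ hm)
      simp [pvStepA, hx, ih _ hxs]

theorem pvFoldA_eq_altGo (ls : List String) (p : List (List String)) :
    (ls.foldl pvStepA (p, [])).1 = pvAltGo ls p := by
  fun_induction pvAltGo ls p with
  | case1 ls out h =>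
      rw [PySem.List.index?_eq_none_iff] at h
      rw [pvFoldA_no_blank ls out [] h]
  | case2 ls out i h ih =>
      obtain ⟨pre, suf, hls, hlen, hpre⟩ := (PySem.List.index?_eq_some_iff _ _ _).mp h
      subst hls; subst hlen
      have hsplit : pre ++ "" :: suf = (pre ++ [""]) ++ suf := by simp
      have hdrop : (pre ++ "" :: suf).drop (pre.length + 1) = suf := by
        rw [hsplit, show pre.length + 1 = (pre ++ [""]).length by simp, List.drop_left]
      have htake : (pre ++ "" :: suf).take pre.length = pre := List.take_left
      rw [hdrop, htake] at ih
      rw [List.foldl_append, pvFoldA_no_blank pre out [] hpre, List.foldl_cons]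
      simpa [pvStepA] using ih

-- ===== VERDICT (by name: the statement is the Claim_ definition above) =====
theorem standardised_spec : Claim_equal_standardised := by
  intro lines _
  unfold Spec_standardised standardised standardised_alt
  exact pvFoldA_eq_altGo lines []
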